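-- pv_equiv track=rewrite | github.com/wang1zhen/lyricbridge | lyricbridge/services/lyrics.py | format_timestamp
-- ===== SOURCE A (Python) =====
-- def format_timestamp(timestamp_ms: int, fmt: str) -> str:
--     total_seconds = max(0, timestamp_ms // 1000)
--     hours = total_seconds // 3600
--     minutes = (total_seconds % 3600) // 60
--     seconds = total_seconds % 60
--     ms = timestamp_ms % 1000
--
--     values = {
--         "HH": f"{hours:02d}",
--         "mm": f"{minutes:02d}",
--         "ss": f"{seconds:02d}",
--         "SSS": f"{ms:03d}",
--         "SS": f"{ms // 10:02d}",
--         "S": f"{ms // 100:d}",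
--     }
--
--     for token in ("HH", "mm", "ss", "SSS", "SS", "S"):
--         fmt = fmt.replace(token, values[token])
--     return fmt
-- ===== SOURCE B (Python) =====
-- def format_timestamp(timestamp_ms: int, fmt: str) -> str:
--     total_seconds = max(0, timestamp_ms // 1000)
--     hours = total_seconds // 3600
--     minutes = (total_seconds % 3600) // 60
--     seconds = total_seconds % 60
--     ms = timestamp_ms % 1000
--     v_hh = f"{hours:02d}"
--     v_mm = f"{minutes:02d}"
--     v_ss = f"{seconds:02d}"
--     v_sss = f"{ms:03d}"
--     v_ss2 = f"{ms // 10:02d}"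
--     v_s = f"{ms // 100:d}"
--     out = []
--     i = 0
--     n = len(fmt)
--     while i < n:
--         if fmt.startswith("SSS", i):
--             out.append(v_sss); i += 3
--         elif fmt.startswith("HH", i):
--             out.append(v_hh); i += 2
--         elif fmt.startswith("mm", i):
--             out.append(v_mm); i += 2
--         elif fmt.startswith("ss", i):
--             out.append(v_ss); i += 2
--         elif fmt.startswith("SS", i):
--             out.append(v_ss2); i += 2
--         elif fmt.startswith("S", i):
--             out.append(v_s); i += 1
--         else:
--             out.append(fmt[i]); i += 1
--     return "".join(out)
-- ===== Notes on version B (the rewrite author's own statement) =====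
-- stated objective: alternative
-- what changed: A rewrites the whole format string six times with sequential str.replace passes (one per token); B builds the result in a single left-to-right scan over fmt, greedily matching the longest token (SSS, HH, mm, ss, SS, S) at each position and emitting the corresponding value or the literal character.
import Mathlib
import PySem

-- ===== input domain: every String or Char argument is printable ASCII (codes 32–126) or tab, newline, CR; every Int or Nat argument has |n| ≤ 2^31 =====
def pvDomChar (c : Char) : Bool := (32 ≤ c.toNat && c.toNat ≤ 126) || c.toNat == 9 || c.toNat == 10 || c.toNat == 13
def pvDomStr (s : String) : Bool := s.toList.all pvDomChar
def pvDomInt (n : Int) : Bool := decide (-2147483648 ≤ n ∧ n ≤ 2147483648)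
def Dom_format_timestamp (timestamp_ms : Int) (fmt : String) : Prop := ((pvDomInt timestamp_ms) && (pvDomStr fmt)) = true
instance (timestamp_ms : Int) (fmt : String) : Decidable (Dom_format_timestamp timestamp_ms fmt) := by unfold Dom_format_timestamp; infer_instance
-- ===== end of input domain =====

-- B replaces A's six sequential whole-string str.replace passes by a single greedy
-- longest-match-first left-to-right scan over fmt; same return value, alternative structure.

-- ===== PORT A =====
-- f"{n:0wd}"  (zero-padded decimal; exact for ints, sign stays in front)
def pvFmt0 (n : Int) (w : Int) : String := PySem.Str.zfill (PySem.Int.toStr n) w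

def format_timestamp (timestamp_ms : Int) (fmt : String) : String :=
  let total_seconds : Int := max 0 (PySem.Int.floordiv timestamp_ms 1000)
  let hours := PySem.Int.floordiv total_seconds 3600
  let minutes := PySem.Int.floordiv (PySem.Int.mod total_seconds 3600) 60
  let seconds := PySem.Int.mod total_seconds 60
  let ms := PySem.Int.mod timestamp_ms 1000
  let values : PySem.Dict String String := PySem.Dict.ofList
    [("HH", pvFmt0 hours 2),
     ("mm", pvFmt0 minutes 2),
     ("ss", pvFmt0 seconds 2),
     ("SSS", pvFmt0 ms 3),
     ("SS", pvFmt0 (PySem.Int.floordiv ms 10) 2),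
     ("S", PySem.Int.toStr (PySem.Int.floordiv ms 100))]
  -- for token in ("HH","mm","ss","SSS","SS","S"): fmt = fmt.replace(token, values[token])
  List.foldl (fun f token => PySem.Str.replace f token (values.getD token ""))
    fmt ["HH", "mm", "ss", "SSS", "SS", "S"]

-- ===== PORT B =====
-- f"{n:0wd}" on the List Char side
def pvPad (n : Int) (w : Int) : List Char := PySem.Chars.zfill (PySem.Int.toChars n) w

-- the while loop of B: greedy longest-match-first scan, one token or one literal char per step
def pvScan (vHH vmm vss vSSS vSS2 vS : List Char) (cs : List Char) : List Char :=
  match cs with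
  | [] => []
  | c :: t =>
    if ['S','S','S'].isPrefixOf (c :: t) then vSSS ++ pvScan vHH vmm vss vSSS vSS2 vS (t.drop 2)
    else if ['H','H'].isPrefixOf (c :: t) then vHH ++ pvScan vHH vmm vss vSSS vSS2 vS (t.drop 1)
    else if ['m','m'].isPrefixOf (c :: t) then vmm ++ pvScan vHH vmm vss vSSS vSS2 vS (t.drop 1)
    else if ['s','s'].isPrefixOf (c :: t) then vss ++ pvScan vHH vmm vss vSSS vSS2 vS (t.drop 1)
    else if ['S','S'].isPrefixOf (c :: t) then vSS2 ++ pvScan vHH vmm vss vSSS vSS2 vS (t.drop 1)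
    else if ['S'].isPrefixOf (c :: t) then vS ++ pvScan vHH vmm vss vSSS vSS2 vS t
    else c :: pvScan vHH vmm vss vSSS vSS2 vS t
  termination_by cs.length
  decreasing_by all_goals simp [List.length_drop]

def format_timestamp_alt (timestamp_ms : Int) (fmt : String) : String :=
  let total_seconds : Int := max 0 (PySem.Int.floordiv timestamp_ms 1000)
  let hours := PySem.Int.floordiv total_seconds 3600
  let minutes := PySem.Int.floordiv (PySem.Int.mod total_seconds 3600) 60
  let seconds := PySem.Int.mod total_seconds 60
  let ms := PySem.Int.mod timestamp_ms 1000
  String.ofList (pvScan (pvPad hours 2) (pvPad minutes 2) (pvPad seconds 2)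
    (pvPad ms 3) (pvPad (PySem.Int.floordiv ms 10) 2)
    (PySem.Int.toChars (PySem.Int.floordiv ms 100)) fmt.toList)

-- ===== PRECONDITION & SPEC =====
def Spec_format_timestamp (timestamp_ms : Int) (fmt : String) (out : String) : Prop := out = format_timestamp_alt timestamp_ms fmt
instance (timestamp_ms : Int) (fmt : String) (out : String) : Decidable (Spec_format_timestamp timestamp_ms fmt out) := by unfold Spec_format_timestamp; infer_instance

-- ===== CLAIM (what is proved, stated in full; the proofs are below) =====
def Claim_equal_format_timestamp : Prop := ∀ (timestamp_ms : Int) (fmt : String), Dom_format_timestamp timestamp_ms fmt → Spec_format_timestamp timestamp_ms fmt (format_timestamp timestamp_ms fmt)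

-- ===== LEMMAS AND PROOFS =====

-- a fuel-free rendering of PySem.Chars.replace for a nonempty pattern c0 :: old'
def pvRep (c0 : Char) (old' new : List Char) (l : List Char) : List Char :=
  match l with
  | [] => []
  | c :: t =>
    if (c0 :: old').isPrefixOf (c :: t) then new ++ pvRep c0 old' new (t.drop old'.length)
    else c :: pvRep c0 old' new t
  termination_by l.length
  decreasing_by all_goals simp [List.length_drop]

lemma pvRep_cons_pos {c0 : Char} {old' new : List Char} {c : Char} {t : List Char}
    (h : (c0 :: old').isPrefixOf (c :: t) = true) :
    pvRep c0 old' new (c :: t) = new ++ pvRep c0 old' new (t.drop old'.length) := by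
  rw [pvRep]; simp [h]

lemma pvRep_cons_neg {c0 : Char} {old' new : List Char} {c : Char} {t : List Char}
    (h : ¬ (c0 :: old').isPrefixOf (c :: t) = true) :
    pvRep c0 old' new (c :: t) = c :: pvRep c0 old' new t := by
  rw [pvRep]; simp [h]

lemma pvGo_eq (c0 : Char) (old' new : List Char) :
    ∀ (fuel : Nat) (l acc : List Char), l.length ≤ fuel →
      PySem.Chars.replace.go (c0 :: old') new fuel l acc = acc.reverse ++ pvRep c0 old' new l := by
  intro fuel
  induction fuel with
  | zero =>
    intro l acc h
    have : l = [] := by cases l <;> simp_all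
    subst this
    rw [PySem.Chars.replace.go]; simp [pvRep]
  | succ fuel ih =>
    intro l acc h
    cases l with
    | nil => rw [PySem.Chars.replace.go] <;> simp [pvRep]
    | cons c t =>
      rw [PySem.Chars.replace.go]
      by_cases hp : (c0 :: old').isPrefixOf (c :: t) = true
      · rw [if_pos hp, pvRep_cons_pos hp]
        have hlen : (List.drop (c0 :: old').length (c :: t)).length ≤ fuel := by
          simp [List.length_drop] at *; omega
        rw [ih _ _ hlen]
        simp [List.length_cons]
      · rw [if_neg hp, pvRep_cons_neg hp]
        have hlen : t.length ≤ fuel := by simp at h; omega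
        rw [ih _ _ hlen]
        simp

lemma pvReplace_eq (c0 : Char) (old' new l : List Char) :
    PySem.Chars.replace l (c0 :: old') new = pvRep c0 old' new l := by
  rw [PySem.Chars.replace]
  simp [pvGo_eq c0 old' new l.length l [] (le_refl _)]

lemma pvRep_cons_ne {c0 : Char} {old' new : List Char} {c : Char} {t : List Char}
    (h : c0 ≠ c) :
    pvRep c0 old' new (c :: t) = c :: pvRep c0 old' new t := by
  apply pvRep_cons_neg
  simp [List.isPrefixOf]
  intro he; exact absurd he h

lemma pvRep_append_neutral {c0 : Char} {old' new : List Char} (p x : List Char)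
    (h : ∀ c ∈ p, c ≠ c0) :
    pvRep c0 old' new (p ++ x) = p ++ pvRep c0 old' new x := by
  induction p with
  | nil => simp
  | cons d p ih =>
    have hd : c0 ≠ d := fun he => (h d (by simp)) he.symm
    simpa [pvRep_cons_ne hd] using ih (fun c hc => h c (by simp [hc]))

-- "the head, if any, is not a" is preserved by replacing with a value whose head is not a
def pvNoHead (a : Char) (l : List Char) : Prop := ∀ (c : Char), l.head? = some c → c ≠ a

lemma pvRep_noHead {a c0 : Char} {old' new : List Char} {l : List Char}
    (hne : new ≠ []) (hn : pvNoHead a new) (hl : pvNoHead a l) :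
    pvNoHead a (pvRep c0 old' new l) := by
  cases l with
  | nil => simpa [pvRep] using hl
  | cons c t =>
    by_cases h : (c0 :: old').isPrefixOf (c :: t) = true
    · rw [pvRep_cons_pos h]
      cases new with
      | nil => exact absurd rfl hne
      | cons d u => intro e he; simp at he; subst he; exact hn d rfl
    · rw [pvRep_cons_neg h]
      intro e he; simp at he; subst he; exact hl c rfl

-- digit facts
lemma pvDigitChar_isDigit (n : Nat) (h : n < 10) : (Nat.digitChar n).isDigit = true := by
  interval_cases n <;> decide

lemma pvToDigitsCore_digits :
    ∀ (fuel n : Nat) (acc : List Char), (∀ c ∈ acc, c.isDigit = true) →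
      ∀ c ∈ Nat.toDigitsCore 10 fuel n acc, c.isDigit = true := by
  intro fuel
  induction fuel with
  | zero => intro n acc hacc; rw [Nat.toDigitsCore]; exact hacc
  | succ fuel ih =>
    intro n acc hacc
    rw [Nat.toDigitsCore]
    have hd : (Nat.digitChar (n % 10)).isDigit = true :=
      pvDigitChar_isDigit _ (Nat.mod_lt _ (by omega))
    by_cases h : n / 10 = 0
    · simp only [h]
      intro c hc
      rcases List.mem_cons.mp hc with h' | h'
      · subst h'; exact hd
      · exact hacc c h'
    · simp only [if_neg h]
      refine ih _ _ ?_
      intro c hc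
      rcases List.mem_cons.mp hc with h' | h'
      · subst h'; exact hd
      · exact hacc c h'

lemma pvToDigitsCore_ne_nil :
    ∀ (fuel n : Nat) (acc : List Char), fuel ≠ 0 ∨ acc ≠ [] → Nat.toDigitsCore 10 fuel n acc ≠ [] := by
  intro fuel
  induction fuel with
  | zero =>
    intro n acc h
    rw [Nat.toDigitsCore]
    tauto
  | succ fuel ih =>
    intro n acc _
    rw [Nat.toDigitsCore]
    by_cases h : n / 10 = 0
    · simp [h]
    · simp only [if_neg h]
      exact ih _ _ (Or.inr (by simp))

lemma pvToChars_digits (n : Int) (h : 0 ≤ n) : ∀ c ∈ PySem.Int.toChars n, c.isDigit = true := by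
  intro c hc
  rw [PySem.Int.toChars, if_neg (by omega)] at hc
  exact pvToDigitsCore_digits _ _ _ (by simp) c hc

lemma pvToChars_ne_nil (n : Int) : PySem.Int.toChars n ≠ [] := by
  rw [PySem.Int.toChars]
  split
  · simp
  · exact pvToDigitsCore_ne_nil _ _ _ (Or.inl (by omega))

-- the shape every substituted value has: nonempty, all decimal digits
def pvNeutral (v : List Char) : Prop := v ≠ [] ∧ ∀ c ∈ v, c.isDigit = true

lemma pvZfill_neutral {cs : List Char} (w : Int)
    (h : ∀ c ∈ cs, c.isDigit = true) (hne : cs ≠ []) :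
    pvNeutral (PySem.Chars.zfill cs w) := by
  rw [PySem.Chars.zfill.eq_def]
  by_cases hw : w ≤ (cs.length : Int)
  · rw [if_pos hw]; exact ⟨hne, h⟩
  · rw [if_neg hw]
    cases cs with
    | nil => exact absurd rfl hne
    | cons c rest =>
      have hcd : c.isDigit = true := h c (by simp)
      have hcs : ¬ (c = '+' ∨ c = '-') := by
        rintro (rfl | rfl) <;> exact absurd hcd (by decide)
      show pvNeutral (if c = '+' ∨ c = '-' then c :: (List.replicate (w.toNat - (c :: rest).length) '0' ++ rest)
        else List.replicate (w.toNat - (c :: rest).length) '0' ++ c :: rest)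
      rw [if_neg hcs]
      constructor
      · simp
      · intro d hd
        rcases List.mem_append.mp hd with h' | h'
        · have : d = '0' := List.eq_of_mem_replicate h'
          subst this; decide
        · exact h d h'

lemma pvPad_neutral (n : Int) (w : Int) (h : 0 ≤ n) : pvNeutral (pvPad n w) :=
  pvZfill_neutral w (pvToChars_digits n h) (pvToChars_ne_nil n)

lemma pvDigit_ne (c : Char) (h : c.isDigit = true) :
    c ≠ 'H' ∧ c ≠ 'm' ∧ c ≠ 's' ∧ c ≠ 'S' := by
  refine ⟨?_, ?_, ?_, ?_⟩ <;> (intro he; subst he; exact absurd h (by decide))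

lemma pvNeutral_noHead {a : Char} {v : List Char} (h : pvNeutral v)
    (ha : ∀ c : Char, c.isDigit = true → c ≠ a) : pvNoHead a v := by
  intro c hc
  exact ha c (h.2 c (by cases v <;> simp_all))

lemma pvNotPrefix_two {a : Char} {y : List Char} (hy : pvNoHead a y) :
    ([a,a].isPrefixOf (a::y)) = false := by
  cases y with
  | nil => simp [List.isPrefixOf]
  | cons d u => simp [List.isPrefixOf]; intro hd; exact absurd hd.symm (hy d rfl)

lemma pvNotPrefix_SSS2 {y : List Char} (hy : pvNoHead 'S' y) :
    (['S','S','S'].isPrefixOf ('S'::'S'::y)) = false := by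
  cases y with
  | nil => decide
  | cons d u => simp [List.isPrefixOf]; intro hd; exact absurd hd.symm (hy d rfl)

lemma pvNotPrefix_SSS1 {y : List Char} (hy : pvNoHead 'S' y) :
    (['S','S','S'].isPrefixOf ('S'::y)) = false := by
  cases y with
  | nil => decide
  | cons d u => simp [List.isPrefixOf]; intro hd; exact absurd hd.symm (hy d rfl)

lemma pvNotPrefix_SS1 {y : List Char} (hy : pvNoHead 'S' y) :
    (['S','S'].isPrefixOf ('S'::y)) = false := by
  cases y with
  | nil => decide
  | cons d u => simp [List.isPrefixOf]; intro hd; exact absurd hd.symm (hy d rfl)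

lemma pvNotPrefix_head {a c : Char} (h : ¬ a = c) (p t : List Char) :
    ((a::p).isPrefixOf (c::t)) = false := by
  simp [List.isPrefixOf]
  intro he
  exact absurd he h

-- the composition of A's six replace passes
def pvChain (vHH vmm vss vSSS vSS2 vS : List Char) (cs : List Char) : List Char :=
  pvRep 'S' [] vS (pvRep 'S' ['S'] vSS2 (pvRep 'S' ['S','S'] vSSS
    (pvRep 's' ['s'] vss (pvRep 'm' ['m'] vmm (pvRep 'H' ['H'] vHH cs)))))

lemma pvChain_eq_scan (vHH vmm vss vSSS vSS2 vS : List Char)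
    (h1 : pvNeutral vHH) (h2 : pvNeutral vmm) (h3 : pvNeutral vss)
    (h4 : pvNeutral vSSS) (h5 : pvNeutral vSS2) :
    ∀ (n : Nat) (cs : List Char), cs.length ≤ n →
      pvChain vHH vmm vss vSSS vSS2 vS cs = pvScan vHH vmm vss vSSS vSS2 vS cs := by
  -- neutrality in the forms the rewrites need
  have nH1 : ∀ c ∈ vHH, c ≠ 'H' := fun c hc => (pvDigit_ne c (h1.2 c hc)).1
  have nm1 : ∀ c ∈ vHH, c ≠ 'm' := fun c hc => (pvDigit_ne c (h1.2 c hc)).2.1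
  have ns1 : ∀ c ∈ vHH, c ≠ 's' := fun c hc => (pvDigit_ne c (h1.2 c hc)).2.2.1
  have nS1 : ∀ c ∈ vHH, c ≠ 'S' := fun c hc => (pvDigit_ne c (h1.2 c hc)).2.2.2
  have ns2 : ∀ c ∈ vmm, c ≠ 's' := fun c hc => (pvDigit_ne c (h2.2 c hc)).2.2.1
  have nS2 : ∀ c ∈ vmm, c ≠ 'S' := fun c hc => (pvDigit_ne c (h2.2 c hc)).2.2.2
  have nS3 : ∀ c ∈ vss, c ≠ 'S' := fun c hc => (pvDigit_ne c (h3.2 c hc)).2.2.2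
  have nS4 : ∀ c ∈ vSSS, c ≠ 'S' := fun c hc => (pvDigit_ne c (h4.2 c hc)).2.2.2
  have nS5 : ∀ c ∈ vSS2, c ≠ 'S' := fun c hc => (pvDigit_ne c (h5.2 c hc)).2.2.2
  have dH : ∀ c : Char, c.isDigit = true → c ≠ 'H' := fun c hc => (pvDigit_ne c hc).1
  have dm : ∀ c : Char, c.isDigit = true → c ≠ 'm' := fun c hc => (pvDigit_ne c hc).2.1
  have ds : ∀ c : Char, c.isDigit = true → c ≠ 's' := fun c hc => (pvDigit_ne c hc).2.2.1
  have dS : ∀ c : Char, c.isDigit = true → c ≠ 'S' := fun c hc => (pvDigit_ne c hc).2.2.2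
  have hs4 : pvNoHead 'S' vSSS := pvNeutral_noHead h4 dS
  have hs1 : pvNoHead 'S' vHH := pvNeutral_noHead h1 dS
  have hs2 : pvNoHead 'S' vmm := pvNeutral_noHead h2 dS
  have hs3 : pvNoHead 'S' vss := pvNeutral_noHead h3 dS
  intro n
  induction n with
  | zero =>
    intro cs h
    have : cs = [] := by cases cs <;> simp_all
    subst this
    simp [pvChain, pvRep, pvScan]
  | succ n ih =>
    intro cs hlen
    cases cs with
    | nil => simp [pvChain, pvRep, pvScan]
    | cons c t =>
      -- one `have` per shape of the head of the string
      have caseGen : ∀ (c : Char) (r : List Char), r.length ≤ n →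
          c ≠ 'H' → c ≠ 'm' → c ≠ 's' → c ≠ 'S' →
          pvChain vHH vmm vss vSSS vSS2 vS (c :: r) = pvScan vHH vmm vss vSSS vSS2 vS (c :: r) := by
        intro c r hr hcH hcm hcs hcS
        simp only [pvChain]
        rw [pvRep_cons_ne (Ne.symm hcH), pvRep_cons_ne (Ne.symm hcm), pvRep_cons_ne (Ne.symm hcs),
            pvRep_cons_ne (Ne.symm hcS), pvRep_cons_ne (Ne.symm hcS), pvRep_cons_ne (Ne.symm hcS)]
        rw [pvScan]
        rw [if_neg (by simp [pvNotPrefix_head (fun he => hcS he.symm)]),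
            if_neg (by simp [pvNotPrefix_head (fun he => hcH he.symm)]),
            if_neg (by simp [pvNotPrefix_head (fun he => hcm he.symm)]),
            if_neg (by simp [pvNotPrefix_head (fun he => hcs he.symm)]),
            if_neg (by simp [pvNotPrefix_head (fun he => hcS he.symm)]),
            if_neg (by simp [pvNotPrefix_head (fun he => hcS he.symm)])]
        have := ih r hr; simp only [pvChain] at this; rw [this]
      have caseHH : ∀ (r : List Char), r.length ≤ n →
          pvChain vHH vmm vss vSSS vSS2 vS ('H'::'H'::r) = pvScan vHH vmm vss vSSS vSS2 vS ('H'::'H'::r) := by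
        intro r hr
        simp only [pvChain]
        rw [pvRep_cons_pos (by simp [List.isPrefixOf])]
        simp only [List.length_cons, List.length_nil, Nat.reduceAdd, List.drop_succ_cons, List.drop_zero]
        rw [pvRep_append_neutral vHH _ nm1, pvRep_append_neutral vHH _ ns1,
            pvRep_append_neutral vHH _ nS1, pvRep_append_neutral vHH _ nS1,
            pvRep_append_neutral vHH _ nS1]
        rw [pvScan]
        rw [if_neg (by simp [pvNotPrefix_head (by decide : ¬ 'S' = 'H')]),
            if_pos (by simp [List.isPrefixOf])]
        simp only [List.drop_succ_cons, List.drop_zero]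
        have := ih r hr; simp only [pvChain] at this; rw [this]
      have caseH1 : ∀ (r : List Char), pvNoHead 'H' r → r.length ≤ n →
          pvChain vHH vmm vss vSSS vSS2 vS ('H'::r) = pvScan vHH vmm vss vSSS vSS2 vS ('H'::r) := by
        intro r hrs hr
        simp only [pvChain]
        rw [pvRep_cons_neg (by simp [pvNotPrefix_two hrs]),
            pvRep_cons_ne (c0 := 'm') (c := 'H') (by decide), pvRep_cons_ne (c0 := 's') (c := 'H') (by decide),
            pvRep_cons_ne (c0 := 'S') (c := 'H') (by decide), pvRep_cons_ne (c0 := 'S') (c := 'H') (by decide),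
            pvRep_cons_ne (c0 := 'S') (c := 'H') (by decide)]
        rw [pvScan]
        rw [if_neg (by simp [pvNotPrefix_head (by decide : ¬ 'S' = 'H')]),
            if_neg (by simp [pvNotPrefix_two hrs]),
            if_neg (by simp [pvNotPrefix_head (by decide : ¬ 'm' = 'H')]),
            if_neg (by simp [pvNotPrefix_head (by decide : ¬ 's' = 'H')]),
            if_neg (by simp [pvNotPrefix_head (by decide : ¬ 'S' = 'H')]),
            if_neg (by simp [pvNotPrefix_head (by decide : ¬ 'S' = 'H')])]
        have := ih r hr; simp only [pvChain] at this; rw [this]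
      have casemm : ∀ (r : List Char), r.length ≤ n →
          pvChain vHH vmm vss vSSS vSS2 vS ('m'::'m'::r) = pvScan vHH vmm vss vSSS vSS2 vS ('m'::'m'::r) := by
        intro r hr
        simp only [pvChain]
        rw [pvRep_cons_ne (c0 := 'H') (c := 'm') (by decide), pvRep_cons_ne (c0 := 'H') (c := 'm') (by decide)]
        rw [pvRep_cons_pos (by simp [List.isPrefixOf])]
        simp only [List.length_cons, List.length_nil, Nat.reduceAdd, List.drop_succ_cons, List.drop_zero]
        rw [pvRep_append_neutral vmm _ ns2, pvRep_append_neutral vmm _ nS2,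
            pvRep_append_neutral vmm _ nS2, pvRep_append_neutral vmm _ nS2]
        rw [pvScan]
        rw [if_neg (by simp [pvNotPrefix_head (by decide : ¬ 'S' = 'm')]),
            if_neg (by simp [pvNotPrefix_head (by decide : ¬ 'H' = 'm')]),
            if_pos (by simp [List.isPrefixOf])]
        simp only [List.drop_succ_cons, List.drop_zero]
        have := ih r hr; simp only [pvChain] at this; rw [this]
      have casem1 : ∀ (r : List Char), pvNoHead 'm' r → r.length ≤ n →
          pvChain vHH vmm vss vSSS vSS2 vS ('m'::r) = pvScan vHH vmm vss vSSS vSS2 vS ('m'::r) := by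
        intro r hrs hr
        have hy1 : pvNoHead 'm' (pvRep 'H' ['H'] vHH r) :=
          pvRep_noHead h1.1 (pvNeutral_noHead h1 dm) hrs
        simp only [pvChain]
        rw [pvRep_cons_ne (c0 := 'H') (c := 'm') (by decide),
            pvRep_cons_neg (by simp [pvNotPrefix_two hy1]),
            pvRep_cons_ne (c0 := 's') (c := 'm') (by decide),
            pvRep_cons_ne (c0 := 'S') (c := 'm') (by decide), pvRep_cons_ne (c0 := 'S') (c := 'm') (by decide),
            pvRep_cons_ne (c0 := 'S') (c := 'm') (by decide)]
        rw [pvScan]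
        rw [if_neg (by simp [pvNotPrefix_head (by decide : ¬ 'S' = 'm')]),
            if_neg (by simp [pvNotPrefix_head (by decide : ¬ 'H' = 'm')]),
            if_neg (by simp [pvNotPrefix_two hrs]),
            if_neg (by simp [pvNotPrefix_head (by decide : ¬ 's' = 'm')]),
            if_neg (by simp [pvNotPrefix_head (by decide : ¬ 'S' = 'm')]),
            if_neg (by simp [pvNotPrefix_head (by decide : ¬ 'S' = 'm')])]
        have := ih r hr; simp only [pvChain] at this; rw [this]
      have casess : ∀ (r : List Char), r.length ≤ n →
          pvChain vHH vmm vss vSSS vSS2 vS ('s'::'s'::r) = pvScan vHH vmm vss vSSS vSS2 vS ('s'::'s'::r) := by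
        intro r hr
        simp only [pvChain]
        rw [pvRep_cons_ne (c0 := 'H') (c := 's') (by decide), pvRep_cons_ne (c0 := 'H') (c := 's') (by decide),
            pvRep_cons_ne (c0 := 'm') (c := 's') (by decide), pvRep_cons_ne (c0 := 'm') (c := 's') (by decide)]
        rw [pvRep_cons_pos (by simp [List.isPrefixOf])]
        simp only [List.length_cons, List.length_nil, Nat.reduceAdd, List.drop_succ_cons, List.drop_zero]
        rw [pvRep_append_neutral vss _ nS3, pvRep_append_neutral vss _ nS3,
            pvRep_append_neutral vss _ nS3]
        rw [pvScan]
        rw [if_neg (by simp [pvNotPrefix_head (by decide : ¬ 'S' = 's')]),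
            if_neg (by simp [pvNotPrefix_head (by decide : ¬ 'H' = 's')]),
            if_neg (by simp [pvNotPrefix_head (by decide : ¬ 'm' = 's')]),
            if_pos (by simp [List.isPrefixOf])]
        simp only [List.drop_succ_cons, List.drop_zero]
        have := ih r hr; simp only [pvChain] at this; rw [this]
      have cases1 : ∀ (r : List Char), pvNoHead 's' r → r.length ≤ n →
          pvChain vHH vmm vss vSSS vSS2 vS ('s'::r) = pvScan vHH vmm vss vSSS vSS2 vS ('s'::r) := by
        intro r hrs hr
        have hy2 : pvNoHead 's' (pvRep 'm' ['m'] vmm (pvRep 'H' ['H'] vHH r)) :=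
          pvRep_noHead h2.1 (pvNeutral_noHead h2 ds) (pvRep_noHead h1.1 (pvNeutral_noHead h1 ds) hrs)
        simp only [pvChain]
        rw [pvRep_cons_ne (c0 := 'H') (c := 's') (by decide),
            pvRep_cons_ne (c0 := 'm') (c := 's') (by decide),
            pvRep_cons_neg (by simp [pvNotPrefix_two hy2]),
            pvRep_cons_ne (c0 := 'S') (c := 's') (by decide), pvRep_cons_ne (c0 := 'S') (c := 's') (by decide),
            pvRep_cons_ne (c0 := 'S') (c := 's') (by decide)]
        rw [pvScan]
        rw [if_neg (by simp [pvNotPrefix_head (by decide : ¬ 'S' = 's')]),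
            if_neg (by simp [pvNotPrefix_head (by decide : ¬ 'H' = 's')]),
            if_neg (by simp [pvNotPrefix_head (by decide : ¬ 'm' = 's')]),
            if_neg (by simp [pvNotPrefix_two hrs]),
            if_neg (by simp [pvNotPrefix_head (by decide : ¬ 'S' = 's')]),
            if_neg (by simp [pvNotPrefix_head (by decide : ¬ 'S' = 's')])]
        have := ih r hr; simp only [pvChain] at this; rw [this]
      have caseSSS : ∀ (r : List Char), r.length ≤ n →
          pvChain vHH vmm vss vSSS vSS2 vS ('S'::'S'::'S'::r) = pvScan vHH vmm vss vSSS vSS2 vS ('S'::'S'::'S'::r) := by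
        intro r hr
        simp only [pvChain]
        rw [pvRep_cons_ne (c0 := 'H') (c := 'S') (by decide), pvRep_cons_ne (c0 := 'H') (c := 'S') (by decide),
            pvRep_cons_ne (c0 := 'H') (c := 'S') (by decide),
            pvRep_cons_ne (c0 := 'm') (c := 'S') (by decide), pvRep_cons_ne (c0 := 'm') (c := 'S') (by decide),
            pvRep_cons_ne (c0 := 'm') (c := 'S') (by decide),
            pvRep_cons_ne (c0 := 's') (c := 'S') (by decide), pvRep_cons_ne (c0 := 's') (c := 'S') (by decide),
            pvRep_cons_ne (c0 := 's') (c := 'S') (by decide)]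
        rw [pvRep_cons_pos (by simp [List.isPrefixOf])]
        simp only [List.length_cons, List.length_nil, Nat.reduceAdd, List.drop_succ_cons, List.drop_zero]
        rw [pvRep_append_neutral vSSS _ nS4, pvRep_append_neutral vSSS _ nS4]
        rw [pvScan]
        rw [if_pos (by simp [List.isPrefixOf])]
        simp only [List.drop_succ_cons, List.drop_zero]
        have := ih r hr; simp only [pvChain] at this; rw [this]
      have caseSS : ∀ (r : List Char), pvNoHead 'S' r → r.length ≤ n →
          pvChain vHH vmm vss vSSS vSS2 vS ('S'::'S'::r) = pvScan vHH vmm vss vSSS vSS2 vS ('S'::'S'::r) := by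
        intro r hrs hr
        have hy : pvNoHead 'S' (pvRep 's' ['s'] vss (pvRep 'm' ['m'] vmm (pvRep 'H' ['H'] vHH r))) :=
          pvRep_noHead h3.1 hs3 (pvRep_noHead h2.1 hs2 (pvRep_noHead h1.1 hs1 hrs))
        simp only [pvChain]
        rw [pvRep_cons_ne (c0 := 'H') (c := 'S') (by decide), pvRep_cons_ne (c0 := 'H') (c := 'S') (by decide),
            pvRep_cons_ne (c0 := 'm') (c := 'S') (by decide), pvRep_cons_ne (c0 := 'm') (c := 'S') (by decide),
            pvRep_cons_ne (c0 := 's') (c := 'S') (by decide), pvRep_cons_ne (c0 := 's') (c := 'S') (by decide)]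
        rw [pvRep_cons_neg (show ¬ (['S','S','S'].isPrefixOf ('S' :: 'S' :: pvRep 's' ['s'] vss (pvRep 'm' ['m'] vmm (pvRep 'H' ['H'] vHH r)))) = true from by simp [pvNotPrefix_SSS2 hy])]
        rw [pvRep_cons_neg (show ¬ (['S','S','S'].isPrefixOf ('S' :: pvRep 's' ['s'] vss (pvRep 'm' ['m'] vmm (pvRep 'H' ['H'] vHH r)))) = true from by simp [pvNotPrefix_SSS1 hy])]
        rw [pvRep_cons_pos (by simp [List.isPrefixOf])]
        simp only [List.length_cons, List.length_nil, Nat.reduceAdd, List.drop_succ_cons, List.drop_zero]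
        rw [pvRep_append_neutral vSS2 _ nS5]
        rw [pvScan]
        rw [if_neg (by simp [pvNotPrefix_SSS2 hrs]),
            if_neg (by simp [pvNotPrefix_head (by decide : ¬ 'H' = 'S')]),
            if_neg (by simp [pvNotPrefix_head (by decide : ¬ 'm' = 'S')]),
            if_neg (by simp [pvNotPrefix_head (by decide : ¬ 's' = 'S')]),
            if_pos (by simp [List.isPrefixOf])]
        simp only [List.drop_succ_cons, List.drop_zero]
        have := ih r hr; simp only [pvChain] at this; rw [this]
      have caseS1 : ∀ (r : List Char), pvNoHead 'S' r → r.length ≤ n →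
          pvChain vHH vmm vss vSSS vSS2 vS ('S'::r) = pvScan vHH vmm vss vSSS vSS2 vS ('S'::r) := by
        intro r hrs hr
        have hy : pvNoHead 'S' (pvRep 's' ['s'] vss (pvRep 'm' ['m'] vmm (pvRep 'H' ['H'] vHH r))) :=
          pvRep_noHead h3.1 hs3 (pvRep_noHead h2.1 hs2 (pvRep_noHead h1.1 hs1 hrs))
        have hz : pvNoHead 'S' (pvRep 'S' ['S','S'] vSSS (pvRep 's' ['s'] vss (pvRep 'm' ['m'] vmm (pvRep 'H' ['H'] vHH r)))) :=
          pvRep_noHead h4.1 hs4 hy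
        simp only [pvChain]
        rw [pvRep_cons_ne (c0 := 'H') (c := 'S') (by decide),
            pvRep_cons_ne (c0 := 'm') (c := 'S') (by decide),
            pvRep_cons_ne (c0 := 's') (c := 'S') (by decide)]
        rw [pvRep_cons_neg (show ¬ (['S','S','S'].isPrefixOf ('S' :: pvRep 's' ['s'] vss (pvRep 'm' ['m'] vmm (pvRep 'H' ['H'] vHH r)))) = true from by simp [pvNotPrefix_SSS1 hy])]
        rw [pvRep_cons_neg (show ¬ (['S','S'].isPrefixOf ('S' :: pvRep 'S' ['S','S'] vSSS (pvRep 's' ['s'] vss (pvRep 'm' ['m'] vmm (pvRep 'H' ['H'] vHH r))))) = true from by simp [pvNotPrefix_SS1 hz])]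
        rw [pvRep_cons_pos (by simp [List.isPrefixOf])]
        simp only [List.length_nil, List.drop_zero]
        rw [pvScan]
        rw [if_neg (by simp [pvNotPrefix_SSS1 hrs]),
            if_neg (by simp [pvNotPrefix_head (by decide : ¬ 'H' = 'S')]),
            if_neg (by simp [pvNotPrefix_head (by decide : ¬ 'm' = 'S')]),
            if_neg (by simp [pvNotPrefix_head (by decide : ¬ 's' = 'S')]),
            if_neg (by simp [pvNotPrefix_SS1 hrs]),
            if_pos (by simp [List.isPrefixOf])]
        have := ih r hr; simp only [pvChain] at this; rw [this]
      -- dispatch on the first one-to-three characters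
      simp only [List.length_cons] at hlen
      by_cases hcS : c = 'S'
      · subst hcS
        cases t with
        | nil => exact caseS1 [] (fun d h => by simp at h) (by simp only [List.length_nil] at hlen ⊢; omega)
        | cons d u =>
          by_cases hd : d = 'S'
          · subst hd
            cases u with
            | nil => exact caseSS [] (fun e h => by simp at h) (by simp only [List.length_cons, List.length_nil] at hlen ⊢; omega)
            | cons e v2 =>
              by_cases he : e = 'S'
              · subst he; exact caseSSS v2 (by simp only [List.length_cons] at hlen ⊢; omega)
              · exact caseSS (e::v2) (fun x h => by simp at h; subst h; exact he) (by simp only [List.length_cons] at hlen ⊢; omega)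
          · exact caseS1 (d::u) (fun x h => by simp at h; subst h; exact hd) (by simp only [List.length_cons] at hlen ⊢; omega)
      · by_cases hcH : c = 'H'
        · subst hcH
          cases t with
          | nil => exact caseH1 [] (fun d h => by simp at h) (by simp only [List.length_nil] at hlen ⊢; omega)
          | cons d u =>
            by_cases hd : d = 'H'
            · subst hd; exact caseHH u (by simp only [List.length_cons] at hlen ⊢; omega)
            · exact caseH1 (d::u) (fun x h => by simp at h; subst h; exact hd) (by simp only [List.length_cons] at hlen ⊢; omega)
        · by_cases hcm : c = 'm'
          · subst hcm
            cases t with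
            | nil => exact casem1 [] (fun d h => by simp at h) (by simp only [List.length_nil] at hlen ⊢; omega)
            | cons d u =>
              by_cases hd : d = 'm'
              · subst hd; exact casemm u (by simp only [List.length_cons] at hlen ⊢; omega)
              · exact casem1 (d::u) (fun x h => by simp at h; subst h; exact hd) (by simp only [List.length_cons] at hlen ⊢; omega)
          · by_cases hcs : c = 's'
            · subst hcs
              cases t with
              | nil => exact cases1 [] (fun d h => by simp at h) (by simp only [List.length_nil] at hlen ⊢; omega)
              | cons d u =>
                by_cases hd : d = 's'
                · subst hd; exact casess u (by simp only [List.length_cons] at hlen ⊢; omega)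
                · exact cases1 (d::u) (fun x h => by simp at h; subst h; exact hd) (by simp only [List.length_cons] at hlen ⊢; omega)
            · exact caseGen c t (by omega) hcH hcm hcs hcS

-- ===== VERDICT (by name: the statement is the Claim_ definition above) =====
lemma pvGet0 (a b c d e f : String) :
    (PySem.Dict.ofList [("HH",a),("mm",b),("ss",c),("SSS",d),("SS",e),("S",f)]).getD "HH" "" = a := by
  simp [PySem.Dict.ofList, PySem.Dict.getD, PySem.Dict.get?, PySem.Dict.update,
    PySem.Dict.empty, PySem.Dict.insert, PySem.Dict.contains]

lemma pvGet1 (a b c d e f : String) :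
    (PySem.Dict.ofList [("HH",a),("mm",b),("ss",c),("SSS",d),("SS",e),("S",f)]).getD "mm" "" = b := by
  simp [PySem.Dict.ofList, PySem.Dict.getD, PySem.Dict.get?, PySem.Dict.update,
    PySem.Dict.empty, PySem.Dict.insert, PySem.Dict.contains]

lemma pvGet2 (a b c d e f : String) :
    (PySem.Dict.ofList [("HH",a),("mm",b),("ss",c),("SSS",d),("SS",e),("S",f)]).getD "ss" "" = c := by
  simp [PySem.Dict.ofList, PySem.Dict.getD, PySem.Dict.get?, PySem.Dict.update,
    PySem.Dict.empty, PySem.Dict.insert, PySem.Dict.contains]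

lemma pvGet3 (a b c d e f : String) :
    (PySem.Dict.ofList [("HH",a),("mm",b),("ss",c),("SSS",d),("SS",e),("S",f)]).getD "SSS" "" = d := by
  simp [PySem.Dict.ofList, PySem.Dict.getD, PySem.Dict.get?, PySem.Dict.update,
    PySem.Dict.empty, PySem.Dict.insert, PySem.Dict.contains]

lemma pvGet4 (a b c d e f : String) :
    (PySem.Dict.ofList [("HH",a),("mm",b),("ss",c),("SSS",d),("SS",e),("S",f)]).getD "SS" "" = e := by
  simp [PySem.Dict.ofList, PySem.Dict.getD, PySem.Dict.get?, PySem.Dict.update,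
    PySem.Dict.empty, PySem.Dict.insert, PySem.Dict.contains]

lemma pvGet5 (a b c d e f : String) :
    (PySem.Dict.ofList [("HH",a),("mm",b),("ss",c),("SSS",d),("SS",e),("S",f)]).getD "S" "" = f := by
  simp [PySem.Dict.ofList, PySem.Dict.getD, PySem.Dict.get?, PySem.Dict.update,
    PySem.Dict.empty, PySem.Dict.insert, PySem.Dict.contains]

lemma pvFmt0_toList (n : Int) (w : Int) : (pvFmt0 n w).toList = pvPad n w := by
  simp [pvFmt0, pvPad, PySem.Str.toList_zfill, PySem.Int.toList_toStr]

lemma pvFinal (timestamp_ms : Int) (fmt : String) :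
    format_timestamp timestamp_ms fmt = format_timestamp_alt timestamp_ms fmt := by
  unfold format_timestamp format_timestamp_alt
  apply String.toList_inj.mp
  simp only [List.foldl, pvGet0, pvGet1, pvGet2, pvGet3, pvGet4, pvGet5]
  simp only [PySem.Str.toList_replace, String.toList_ofList, pvFmt0_toList, PySem.Int.toList_toStr]
  rw [show ("HH" : String).toList = ['H','H'] from rfl, show ("mm" : String).toList = ['m','m'] from rfl,
      show ("ss" : String).toList = ['s','s'] from rfl, show ("SSS" : String).toList = ['S','S','S'] from rfl,
      show ("SS" : String).toList = ['S','S'] from rfl, show ("S" : String).toList = ['S'] from rfl]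
  rw [pvReplace_eq 'H' ['H'], pvReplace_eq 'm' ['m'], pvReplace_eq 's' ['s'],
      pvReplace_eq 'S' ['S','S'], pvReplace_eq 'S' ['S'], pvReplace_eq 'S' []]
  have htot : (0:Int) ≤ max 0 (PySem.Int.floordiv timestamp_ms 1000) := le_max_left 0 _
  have hms : (0:Int) ≤ PySem.Int.mod timestamp_ms 1000 := PySem.Int.mod_nonneg _ (by norm_num)
  have hdiv : ∀ (a b : Int), 0 ≤ a → 0 < b → 0 ≤ PySem.Int.floordiv a b := by
    intro a b ha hb
    rw [PySem.Int.floordiv_eq_ediv_of_pos hb]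
    exact Int.ediv_nonneg ha (le_of_lt hb)
  exact pvChain_eq_scan _ _ _ _ _ _
    (pvPad_neutral _ 2 (hdiv _ _ htot (by norm_num)))
    (pvPad_neutral _ 2 (hdiv _ _ (PySem.Int.mod_nonneg _ (by norm_num)) (by norm_num)))
    (pvPad_neutral _ 2 (PySem.Int.mod_nonneg _ (by norm_num)))
    (pvPad_neutral _ 3 hms)
    (pvPad_neutral _ 2 (hdiv _ _ hms (by norm_num)))
    fmt.toList.length fmt.toList (le_refl _)

theorem format_timestamp_spec : Claim_equal_format_timestamp := by
  intro timestamp_ms fmt _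
  unfold Spec_format_timestamp
  exact pvFinal timestamp_ms fmt
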